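-- pv_equiv track=rewrite | github.com/Jinhoss/TIL | Algorithm/programmers/테이블 해시 함수.py | solution
-- ===== SOURCE A (Python) =====
-- def solution(data, col, row_begin, row_end):
--     sorted_data = sorted(data, key=lambda x:(x[col-1], -x[0]))
--     answer = 0
--     for i in range(row_begin, row_end+1):
--         idx = i - 1
--         sum_v = 0
--         for x in sorted_data[idx]:
--             sum_v += x%i
--
--         answer^=sum_v
--
--     return answer
-- ===== SOURCE B (Python) =====
-- def solution(data, col, row_begin, row_end):
--     # rank-counting instead of sorting: row j's position in the stable sort is the
--     # number of rows with a strictly smaller key, plus earlier rows with an equal key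
--     keys = [(row[col - 1], -row[0]) for row in data]
--     ranks = [sum(1 for j2, k2 in enumerate(keys) if k2 < kj or (k2 == kj and j2 < j))
--              for j, kj in enumerate(keys)]
--     answer = 0
--     for i in range(row_begin, row_end + 1):
--         row = data[ranks.index(i - 1)]
--         answer ^= sum(x % i for x in row)
--     return answer
-- ===== Notes on version B (the rewrite author's own statement) =====
-- stated objective: alternative
-- what changed: B never sorts: it computes each row's stable sort position by counting rows with a smaller (or equal-but-earlier) key, then selects each band row directly via ranks.index, whereas A materializes the fully sorted table and indexes into it.
-- outside the precondition, e.g. on solution([[1], [2]], 1, -1, -1): A returns 0, B raises ValueError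
import Mathlib
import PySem

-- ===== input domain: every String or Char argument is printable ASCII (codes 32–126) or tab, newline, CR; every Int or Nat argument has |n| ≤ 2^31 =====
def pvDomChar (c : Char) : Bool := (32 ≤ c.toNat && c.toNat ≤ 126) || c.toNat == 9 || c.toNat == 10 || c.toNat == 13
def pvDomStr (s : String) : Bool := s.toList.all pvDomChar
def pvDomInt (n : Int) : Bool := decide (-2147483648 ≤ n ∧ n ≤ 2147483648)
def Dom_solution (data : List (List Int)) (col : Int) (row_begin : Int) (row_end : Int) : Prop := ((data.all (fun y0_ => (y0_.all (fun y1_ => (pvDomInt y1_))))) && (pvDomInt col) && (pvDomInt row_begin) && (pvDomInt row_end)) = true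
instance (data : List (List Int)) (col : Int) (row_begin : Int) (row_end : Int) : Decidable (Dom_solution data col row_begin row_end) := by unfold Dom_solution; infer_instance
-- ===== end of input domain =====

-- B replaces the full sort by O(n^2) stable-rank counting and direct selection of the band rows; objective: alternative (not faster).
-- A and B agree on the return value; neither mutates its arguments.

-- ===== PORT A =====
def solution (data : List (List Int)) (col : Int) (row_begin : Int) (row_end : Int) : Int :=
  let sorted_data := PySem.List.sorted2 data
    (fun x => PySem.List.pyGetD x (col - 1) 0) (fun x => -(PySem.List.pyGetD x 0 0)) false
  (PySem.List.pyRange row_begin (row_end + 1) 1).foldl (fun answer i =>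
    let sum_v := (PySem.List.pyGetD sorted_data (i - 1) []).foldl
      (fun s x => s + PySem.Int.mod x i) 0
    PySem.Int.bxor answer sum_v) 0

-- ===== PORT B =====
def solution_alt (data : List (List Int)) (col : Int) (row_begin : Int) (row_end : Int) : Int :=
  let keys := data.map (fun row => (PySem.List.pyGetD row (col - 1) 0, -(PySem.List.pyGetD row 0 0)))
  let ranks := (PySem.List.enumerate keys 0).map (fun jk =>
    (PySem.List.enumerate keys 0).foldl (fun acc q =>
      if q.2.1 < jk.2.1 ∨ (q.2.1 = jk.2.1 ∧ q.2.2 < jk.2.2) ∨ (q.2 = jk.2 ∧ q.1 < jk.1)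
      then acc + 1 else acc) (0 : Int))
  (PySem.List.pyRange row_begin (row_end + 1) 1).foldl (fun answer i =>
    let row := PySem.List.pyGetD data ((PySem.List.index? ranks (i - 1)).getD 0 : Int) []
    PySem.Int.bxor answer (row.foldl (fun s x => s + PySem.Int.mod x i) 0)) 0

-- ===== PRECONDITION & SPEC =====
-- Pre_ is the natural domain: every row admits the key lookups (Python raises IndexError otherwise),
-- 1 ≤ row_begin (i = 0 raises ZeroDivisionError) and a non-empty band stays within the table (IndexError).
-- It also excludes negative bands (row_begin ≤ row_end < 1), where A returns a value only through
-- negative-index wraparound and modulo by a negative row number, while B raises ValueError there.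
def Pre_solution (data : List (List Int)) (col : Int) (row_begin : Int) (row_end : Int) : Prop :=
  (∀ row ∈ data, PySem.Raise.InRange row.length (col - 1)) ∧ 1 ≤ row_begin ∧
    (row_begin ≤ row_end → row_end ≤ data.length)
instance (data : List (List Int)) (col : Int) (row_begin : Int) (row_end : Int) : Decidable (Pre_solution data col row_begin row_end) := by unfold Pre_solution; infer_instance

def pvWitness_solution : List (List Int) × Int × Int × Int := ([[1], [2]], 1, 1, 2)

def Spec_solution (data : List (List Int)) (col : Int) (row_begin : Int) (row_end : Int) (out : Int) : Prop := out = solution_alt data col row_begin row_end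
instance (data : List (List Int)) (col : Int) (row_begin : Int) (row_end : Int) (out : Int) : Decidable (Spec_solution data col row_begin row_end out) := by unfold Spec_solution; infer_instance

-- ===== CLAIM (what is proved, stated in full; the proofs are below) =====
def Claim_equal_solution : Prop := ∀ (data : List (List Int)) (col : Int) (row_begin : Int) (row_end : Int), Dom_solution data col row_begin row_end → Pre_solution data col row_begin row_end → Spec_solution data col row_begin row_end (solution data col row_begin row_end)

-- ===== LEMMAS AND PROOFS =====

def pvK (col : Int) (row : List Int) : Int × Int :=
  (PySem.List.pyGetD row (col - 1) 0, -(PySem.List.pyGetD row 0 0))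

def pvKey' (col : Int) (p : Int × List Int) : (Int ×ₗ Int) ×ₗ Int :=
  toLex (toLex (pvK col p.2), p.1)

def pvBefore (col : Int) (a b : List Int) : Bool :=
  decide ((pvK col a).1 < (pvK col b).1) ||
    (!decide ((pvK col b).1 < (pvK col a).1) && decide ((pvK col a).2 < (pvK col b).2))

def pvT (col : Int) (data : List (List Int)) : List (Int × List Int) :=
  PySem.List.sorted (PySem.List.enumerate data 0) (pvKey' col) false

theorem pvKey'_lt_iff (col : Int) (a b : Int × List Int) :
    pvKey' col a < pvKey' col b ↔
      ((pvK col a.2).1 < (pvK col b.2).1 ∨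
        ((pvK col a.2).1 = (pvK col b.2).1 ∧ (pvK col a.2).2 < (pvK col b.2).2) ∨
        (pvK col a.2 = pvK col b.2 ∧ a.1 < b.1)) := by
  unfold pvKey'
  rw [Prod.Lex.lt_iff]
  simp [Prod.Lex.lt_iff, Prod.ext_iff]
  tauto

theorem pvBefore_eq_decide (col : Int) (a b : List Int) :
    pvBefore col a b = decide ((pvK col a).1 < (pvK col b).1 ∨
      ((pvK col a).1 = (pvK col b).1 ∧ (pvK col a).2 < (pvK col b).2)) := by
  unfold pvBefore
  rw [Bool.eq_iff_iff]
  simp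
  omega

theorem pvBridge (col : Int) (x : List Int) (n : Int) (q : Int × List Int) (hq : q.1 < n) :
    decide (pvKey' col (n, x) < pvKey' col q) = pvBefore col x q.2 := by
  rw [Bool.eq_iff_iff, pvBefore_eq_decide]
  simp only [decide_eq_true_eq, pvKey'_lt_iff]
  constructor
  · rintro (h | h | ⟨_, h⟩)
    · exact Or.inl h
    · exact Or.inr h
    · omega
  · rintro (h | h)
    · exact Or.inl h
    · exact Or.inr (Or.inl h)

theorem pvInsert_snd (col : Int) (x : List Int) (n : Int) :
    ∀ (l : List (Int × List Int)), (∀ q ∈ l, q.1 < n) →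
    PySem.List.insertBy (pvBefore col) x (l.map Prod.snd)
      = (PySem.List.insertBy (fun a b => decide (pvKey' col a < pvKey' col b)) (n, x) l).map Prod.snd := by
  intro l
  induction l with
  | nil => intro _; simp [PySem.List.insertBy]
  | cons q l ih =>
    intro hb
    have hq : q.1 < n := hb q (List.mem_cons_self)
    have hl : ∀ p ∈ l, p.1 < n := fun p hp => hb p (List.mem_cons_of_mem _ hp)
    simp only [List.map_cons, PySem.List.insertBy, pvBridge col x n q hq]
    by_cases h : pvBefore col x q.2
    · simp [h]
    · simp [h, ih hl]

theorem pvFold_snd (col : Int) :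
    ∀ (xs : List (List Int)) (l : List (Int × List Int)) (n : Int), (∀ q ∈ l, q.1 < n) →
    xs.foldl (fun acc x => PySem.List.insertBy (pvBefore col) x acc) (l.map Prod.snd)
      = ((PySem.List.enumerate xs n).foldl
          (fun acc p => PySem.List.insertBy (fun a b => decide (pvKey' col a < pvKey' col b)) p acc) l).map Prod.snd := by
  intro xs
  induction xs with
  | nil => intro l n _; simp [PySem.List.enumerate_nil]
  | cons x xs ih =>
    intro l n hb
    rw [PySem.List.enumerate_cons]
    simp only [List.foldl_cons]
    rw [pvInsert_snd col x n l hb]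
    apply ih
    intro q hq
    rcases (PySem.List.mem_insertBy _ _ _ _).mp hq with h | h
    · simp [h]
    · exact lt_trans (hb q h) (by omega)

theorem pvS_eq_map_snd (col : Int) (data : List (List Int)) :
    PySem.List.sorted2 data (fun x => PySem.List.pyGetD x (col - 1) 0)
      (fun x => -(PySem.List.pyGetD x 0 0)) false = (pvT col data).map Prod.snd := by
  have h1 : PySem.List.sorted2 data (fun x => PySem.List.pyGetD x (col - 1) 0)
      (fun x => -(PySem.List.pyGetD x 0 0)) false
      = data.foldl (fun acc x => PySem.List.insertBy (pvBefore col) x acc) [] := rfl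
  rw [h1, pvT, PySem.List.sorted_eq_foldl_insertBy]
  have := pvFold_snd col data [] 0 (by simp)
  simpa using this

theorem pvKey'_fst (col : Int) (p q : Int × List Int) (h : pvKey' col p = pvKey' col q) : p.1 = q.1 := by
  unfold pvKey' at h
  have := toLex_inj.mp h
  exact (Prod.ext_iff.mp this).2

theorem pvT_pairwise (col : Int) (data : List (List Int)) :
    (pvT col data).Pairwise (fun p q => pvKey' col p < pvKey' col q) := by
  have hle : (pvT col data).Pairwise (fun p q => pvKey' col p ≤ pvKey' col q) :=
    PySem.List.sorted_pairwise _ _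
  have hperm : (pvT col data).Perm (PySem.List.enumerate data 0) := PySem.List.sorted_perm _ _ _
  have hnd : ((PySem.List.enumerate data 0).map Prod.fst).Nodup := by
    rw [PySem.List.map_fst_enumerate]
    exact PySem.List.nodup_pyRange_one _ _
  have hnd2 : ((pvT col data).map Prod.fst).Nodup := ((hperm.map Prod.fst).nodup_iff).mpr hnd
  have hne : (pvT col data).Pairwise (fun p q => p.1 ≠ q.1) := List.pairwise_map.mp hnd2
  refine (hle.and hne).imp ?_
  rintro a b ⟨h1, h2⟩
  exact lt_of_le_of_ne h1 (fun h => h2 (pvKey'_fst col a b h))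

theorem pvCount_pos {β γ : Type} [LinearOrder γ] (f : β → γ) :
    ∀ (l : List β), l.Pairwise (fun a b => f a < f b) →
      ∀ (p : Nat), p < l.length → ∀ (x : β), l[p]? = some x →
        l.countP (fun q => decide (f q < f x)) = p := by
  intro l
  induction l with
  | nil => intro _ p h; simp at h
  | cons a l ih =>
    intro hp p h x hx
    have ha : ∀ b ∈ l, f a < f b := fun b hb => (List.pairwise_cons.mp hp).1 b hb
    have hl : l.Pairwise (fun a b => f a < f b) := (List.pairwise_cons.mp hp).2
    cases p with
    | zero =>
      simp only [List.getElem?_cons_zero, Option.some_inj] at hx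
      subst hx
      rw [List.countP_cons]
      have h0 : List.countP (fun q => decide (f q < f a)) l = 0 :=
        List.countP_eq_zero.mpr (fun b hb => by simp [not_lt.mpr (le_of_lt (ha b hb))])
      rw [h0]
      simp
    | succ p =>
      have hlen : p < l.length := by simpa using h
      simp only [List.getElem?_cons_succ] at hx
      have hmem : x ∈ l := by
        have := List.getElem?_eq_some_iff.mp hx
        rcases this with ⟨hh, rfl⟩
        exact List.getElem_mem hh
      rw [List.countP_cons, ih hl p hlen x hx]
      simp [ha x hmem]

def pvRank (col : Int) (data : List (List Int)) (e : Int × List Int) : Nat :=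
  (PySem.List.enumerate data 0).countP (fun q => decide (pvKey' col q < pvKey' col e))

theorem pvEnumerate_map {α β : Type} (g : α → β) :
    ∀ (xs : List α) (s : Int),
      PySem.List.enumerate (xs.map g) s = (PySem.List.enumerate xs s).map (fun p => (p.1, g p.2)) := by
  intro xs
  induction xs with
  | nil => intro s; simp [PySem.List.enumerate_nil]
  | cons x xs ih => intro s; simp [PySem.List.enumerate_cons, ih]

-- ranks[j]? in solution_alt

theorem pvRanks_getElem (col : Int) (data : List (List Int)) (j : Nat) (hj : j < data.length) :
    (((PySem.List.enumerate (data.map (fun row => (PySem.List.pyGetD row (col - 1) 0, -(PySem.List.pyGetD row 0 0)))) 0).map (fun jk =>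
      (PySem.List.enumerate (data.map (fun row => (PySem.List.pyGetD row (col - 1) 0, -(PySem.List.pyGetD row 0 0)))) 0).foldl (fun acc q =>
        if q.2.1 < jk.2.1 ∨ (q.2.1 = jk.2.1 ∧ q.2.2 < jk.2.2) ∨ (q.2 = jk.2 ∧ q.1 < jk.1)
        then acc + 1 else acc) (0 : Int)))[j]?) = some ((pvRank col data ((j : Int), data[j]) : Int)) := by
  have hkeys : data.map (fun row => (PySem.List.pyGetD row (col - 1) 0, -(PySem.List.pyGetD row 0 0)))
      = data.map (pvK col) := rfl
  rw [hkeys, pvEnumerate_map]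
  rw [List.getElem?_map]
  have he : (PySem.List.enumerate data 0)[j]? = some ((j : Int), data[j]) := by
    rw [List.getElem?_eq_getElem (by simpa [PySem.List.length_enumerate] using hj)]
    rw [PySem.List.getElem_enumerate]
    simp
  rw [List.getElem?_map, he]
  simp only [Option.map_some, Option.some_inj]
  rw [PySem.List.foldl_ite_add_one]
  rw [List.countP_map]
  rw [pvRank, zero_add]
  congr 1
  apply List.countP_congr
  intro q hq
  simp only [Function.comp]
  simp only [decide_eq_true_eq]
  rw [pvKey'_lt_iff]

-- ===== VERDICT (by name: the statement is the Claim_ definition above) =====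
theorem solution_spec : Claim_equal_solution := by
  intro data col rb re hdom hpre
  obtain ⟨hkeysOK, hrb, hre⟩ := hpre
  unfold Spec_solution solution solution_alt
  apply PySem.List.foldl_congr_mem
  intro acc i hi
  rw [PySem.List.mem_pyRange_one] at hi
  have h1 : 1 ≤ i := le_trans hrb hi.1
  have hren : re ≤ (data.length : Int) := hre (by omega)
  have ht : ((i - 1).toNat : Int) = i - 1 := by omega
  have htlen : (i - 1).toNat < data.length := by omega
  -- abbreviations
  have hlenT : (pvT col data).length = data.length := by
    rw [pvT, PySem.List.length_sorted, PySem.List.length_enumerate]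
  have hperm : (pvT col data).Perm (PySem.List.enumerate data 0) :=
    PySem.List.sorted_perm _ _ _
  have hpw := pvT_pairwise col data
  have htT : (i - 1).toNat < (pvT col data).length := by omega
  set e : Int × List Int := (pvT col data)[(i - 1).toNat] with hedef
  -- A's row is e.2
  have hrowA : PySem.List.pyGetD (PySem.List.sorted2 data
      (fun x => PySem.List.pyGetD x (col - 1) 0) (fun x => -(PySem.List.pyGetD x 0 0)) false)
      (i - 1) [] = e.2 := by
    rw [pvS_eq_map_snd]
    rw [PySem.List.pyGetD_eq_getElem _ _ (by omega) (by simp [hlenT]; omega)]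
    rw [List.getElem_map]
  -- the rank of e is (i-1).toNat
  have hrank_e : pvRank col data e = (i - 1).toNat := by
    rw [pvRank, ← hperm.countP_eq]
    exact pvCount_pos (pvKey' col) (pvT col data) hpw (i - 1).toNat htT e
      (List.getElem?_eq_getElem htT)
  -- e comes from some original index k
  obtain ⟨k, hk, hek⟩ := (PySem.List.mem_enumerate_iff data 0 e).mp
    (hperm.subset (List.getElem_mem htT))
  -- the ranks list
  set ranks := ((PySem.List.enumerate (data.map (fun row =>
      (PySem.List.pyGetD row (col - 1) 0, -(PySem.List.pyGetD row 0 0)))) 0).map (fun jk =>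
    (PySem.List.enumerate (data.map (fun row =>
      (PySem.List.pyGetD row (col - 1) 0, -(PySem.List.pyGetD row 0 0)))) 0).foldl (fun acc q =>
      if q.2.1 < jk.2.1 ∨ (q.2.1 = jk.2.1 ∧ q.2.2 < jk.2.2) ∨ (q.2 = jk.2 ∧ q.1 < jk.1)
      then acc + 1 else acc) (0 : Int))) with hranksdef
  have hlenR : ranks.length = data.length := by
    simp [hranksdef, PySem.List.length_enumerate]
  have hrk : ranks[k]? = some ((pvRank col data ((k : Int), data[k]) : Int)) :=
    pvRanks_getElem col data k hk
  have hek' : e = ((k : Int), data[k]) := by simpa using hek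
  have hrk2 : ranks[k]? = some (i - 1) := by
    rw [hrk, ← hek', hrank_e, ht]
  -- i-1 occurs in ranks, so index? finds it
  have hmem : (i - 1) ∈ ranks := List.mem_of_getElem? hrk2
  obtain ⟨j₀, hj₀⟩ := Option.isSome_iff_exists.mp
    ((PySem.List.index?_isSome_iff ranks (i - 1)).mpr hmem)
  obtain ⟨hj₀len, hj₀val, _⟩ := PySem.List.getElem_of_index?_eq_some hj₀
  have hj₀n : j₀ < data.length := by omega
  -- the found index has rank (i-1).toNat
  have hrkj : pvRank col data ((j₀ : Int), data[j₀]) = (i - 1).toNat := by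
    have := pvRanks_getElem col data j₀ hj₀n
    rw [List.getElem?_eq_getElem hj₀len] at this
    have h2 : ((pvRank col data ((j₀ : Int), data[j₀]) : Int)) = i - 1 := by
      rw [← Option.some_inj, ← this, hj₀val]
    omega
  -- hence (j₀, data[j₀]) sits at position (i-1).toNat of pvT, i.e. equals e
  have he₀T : ((j₀ : Int), data[j₀]) ∈ pvT col data :=
    hperm.symm.subset ((PySem.List.mem_enumerate_iff data 0 _).mpr ⟨j₀, hj₀n, by simp⟩)
  obtain ⟨q, hq, hTq⟩ := List.mem_iff_getElem.mp he₀T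
  have hq_eq : q = (i - 1).toNat := by
    have hcp := pvCount_pos (pvKey' col) (pvT col data) hpw q hq ((j₀ : Int), data[j₀])
      (by rw [List.getElem?_eq_getElem hq, hTq])
    rw [pvRank, ← hperm.countP_eq] at hrkj
    omega
  have he₀ : e = ((j₀ : Int), data[j₀]) := by
    have hsome : (pvT col data)[q]? = some ((j₀ : Int), data[j₀]) := by
      rw [List.getElem?_eq_getElem hq, hTq]
    rw [hq_eq] at hsome
    rw [List.getElem?_eq_getElem htT] at hsome
    exact Option.some_inj.mp (by rw [← hsome, hedef])
  -- B's row is also e.2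
  have hrowB : PySem.List.pyGetD data (((PySem.List.index? ranks (i - 1)).getD 0 : Nat) : Int) [] = e.2 := by
    rw [hj₀]
    simp only [Option.getD_some]
    rw [PySem.List.pyGetD_eq_getElem _ _ (by omega) (by exact_mod_cast hj₀n)]
    rw [he₀]
    simp
  rw [hrowA]
  rw [hrowB]
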